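-- pv_equiv track=rewrite | github.com/stubblyhead/advent2023 | day18/sixteentons.py | size_grid
-- ===== SOURCE A (Python) =====
-- def size_grid(dir,dist):
--     # need to figure out where the starting point even is
--     max_left = 0
--     max_right = 0
--     max_up = 0
--     max_down = 0
--     x = 0
--     y = 0
--     for i in range(len(dir)):
--         if dir[i] == 'L':
--             x -= dist[i]
--             max_left = min(max_left,x)
--         elif dir[i] == 'R':
--             x += dist[i]
--             max_right = max(max_right,x)
--         elif dir[i] == 'U':
--             y -= dist[i]
--             max_up = min(max_up, y)
--         else:
--             y += dist[i]
--             max_down = max(max_down,y)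
--     return([max_left,max_right,max_up,max_down])
-- ===== SOURCE B (Python) =====
-- def size_grid(dir, dist):
--     # Record every coordinate reached, bucketed by move direction, then take
--     # the extremes (seeded with the starting 0) in a second pass.
--     x = 0
--     y = 0
--     lefts, rights, ups, downs = [], [], [], []
--     for d, n in zip(dir, dist):
--         if d == 'L':
--             x -= n
--             lefts.append(x)
--         elif d == 'R':
--             x += n
--             rights.append(x)
--         elif d == 'U':
--             y -= n
--             ups.append(y)
--         else:
--             y += n
--             downs.append(y)
--     return [min([0] + lefts), max([0] + rights), min([0] + ups), max([0] + downs)]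
-- ===== Notes on version B (the rewrite author's own statement) =====
-- stated objective: alternative
-- what changed: Instead of maintaining four running min/max accumulators inside the index loop, B zips the two lists, records every coordinate reached bucketed by move direction, and computes the four extremes (seeded with 0) in a second pass over those position lists.
import Mathlib
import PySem

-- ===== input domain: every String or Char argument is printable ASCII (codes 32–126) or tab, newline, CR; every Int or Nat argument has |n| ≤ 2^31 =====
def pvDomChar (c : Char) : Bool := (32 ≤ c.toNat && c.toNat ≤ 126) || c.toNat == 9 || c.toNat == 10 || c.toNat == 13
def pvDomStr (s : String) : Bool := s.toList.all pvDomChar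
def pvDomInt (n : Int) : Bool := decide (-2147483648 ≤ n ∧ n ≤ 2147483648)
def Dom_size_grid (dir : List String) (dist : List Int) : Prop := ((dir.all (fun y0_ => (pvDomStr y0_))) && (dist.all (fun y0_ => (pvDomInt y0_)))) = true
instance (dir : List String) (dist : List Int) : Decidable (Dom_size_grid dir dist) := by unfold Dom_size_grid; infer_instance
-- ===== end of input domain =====

-- B records every coordinate reached (bucketed by direction) and takes the extremes in a
-- second pass, instead of A's four running min/max accumulators inside the index loop.

-- ===== PORT A =====
-- literal transliteration: index loop over range(len(dir)), state (max_left, max_right, max_up, max_down, x, y)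
def size_grid (dir : List String) (dist : List Int) : List Int :=
  let s := (PySem.List.pyRange 0 (dir.length : Int) 1).foldl
    (fun (st : Int × Int × Int × Int × Int × Int) i =>
      let ml := st.1; let mr := st.2.1; let mu := st.2.2.1; let md := st.2.2.2.1
      let x := st.2.2.2.2.1; let y := st.2.2.2.2.2
      if PySem.List.pyGetD dir i "" = "L" then
        let x := x - PySem.List.pyGetD dist i 0
        (min ml x, mr, mu, md, x, y)
      else if PySem.List.pyGetD dir i "" = "R" then
        let x := x + PySem.List.pyGetD dist i 0
        (ml, max mr x, mu, md, x, y)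
      else if PySem.List.pyGetD dir i "" = "U" then
        let y := y - PySem.List.pyGetD dist i 0
        (ml, mr, min mu y, md, x, y)
      else
        let y := y + PySem.List.pyGetD dist i 0
        (ml, mr, mu, max md y, x, y))
    (0, 0, 0, 0, 0, 0)
  [s.1, s.2.1, s.2.2.1, s.2.2.2.1]

-- ===== PORT B =====
-- literal transliteration of Source B: zip loop collecting position lists, then min/max with 0 seed
def size_grid_alt (dir : List String) (dist : List Int) : List Int :=
  let t := (dir.zip dist).foldl
    (fun (st : Int × Int × List Int × List Int × List Int × List Int) p =>
      let x := st.1; let y := st.2.1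
      let lefts := st.2.2.1; let rights := st.2.2.2.1
      let ups := st.2.2.2.2.1; let downs := st.2.2.2.2.2
      if p.1 = "L" then
        let x := x - p.2
        (x, y, lefts ++ [x], rights, ups, downs)
      else if p.1 = "R" then
        let x := x + p.2
        (x, y, lefts, rights ++ [x], ups, downs)
      else if p.1 = "U" then
        let y := y - p.2
        (x, y, lefts, rights, ups ++ [y], downs)
      else
        let y := y + p.2
        (x, y, lefts, rights, ups, downs ++ [y]))
    (0, 0, [], [], [], [])
  [(PySem.List.min? ((0 : Int) :: t.2.2.1) (fun z => z)).getD 0,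
   (PySem.List.max? ((0 : Int) :: t.2.2.2.1) (fun z => z)).getD 0,
   (PySem.List.min? ((0 : Int) :: t.2.2.2.2.1) (fun z => z)).getD 0,
   (PySem.List.max? ((0 : Int) :: t.2.2.2.2.2) (fun z => z)).getD 0]

-- ===== PRECONDITION & SPEC =====
-- A indexes dist[i] for every i < len(dir), so it raises IndexError iff dist is shorter than dir.
def Pre_size_grid (dir : List String) (dist : List Int) : Prop := dir.length ≤ dist.length
instance (dir : List String) (dist : List Int) : Decidable (Pre_size_grid dir dist) := by unfold Pre_size_grid; infer_instance
def pvWitness_size_grid : List String × List Int := (["L", "R", "q"], [3, 4, 5])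

def Spec_size_grid (dir : List String) (dist : List Int) (out : List Int) : Prop := out = size_grid_alt dir dist
instance (dir : List String) (dist : List Int) (out : List Int) : Decidable (Spec_size_grid dir dist out) := by unfold Spec_size_grid; infer_instance

-- ===== CLAIM (what is proved, stated in full; the proofs are below) =====
def Claim_equal_size_grid : Prop := ∀ (dir : List String) (dist : List Int), Dom_size_grid dir dist → Pre_size_grid dir dist → Spec_size_grid dir dist (size_grid dir dist)
-- ===== LEMMAS AND PROOFS =====

-- A's loop body as a function of the current (direction, distance) pair
def stepA (st : Int × Int × Int × Int × Int × Int) (p : String × Int) : Int × Int × Int × Int × Int × Int :=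
  let ml := st.1; let mr := st.2.1; let mu := st.2.2.1; let md := st.2.2.2.1
  let x := st.2.2.2.2.1; let y := st.2.2.2.2.2
  if p.1 = "L" then
    let x := x - p.2
    (min ml x, mr, mu, md, x, y)
  else if p.1 = "R" then
    let x := x + p.2
    (ml, max mr x, mu, md, x, y)
  else if p.1 = "U" then
    let y := y - p.2
    (ml, mr, min mu y, md, x, y)
  else
    let y := y + p.2
    (ml, mr, mu, max md y, x, y)

-- B's loop body
def stepB (st : Int × Int × List Int × List Int × List Int × List Int) (p : String × Int) : Int × Int × List Int × List Int × List Int × List Int :=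
  let x := st.1; let y := st.2.1
  let lefts := st.2.2.1; let rights := st.2.2.2.1
  let ups := st.2.2.2.2.1; let downs := st.2.2.2.2.2
  if p.1 = "L" then
    let x := x - p.2
    (x, y, lefts ++ [x], rights, ups, downs)
  else if p.1 = "R" then
    let x := x + p.2
    (x, y, lefts, rights ++ [x], ups, downs)
  else if p.1 = "U" then
    let y := y - p.2
    (x, y, lefts, rights, ups ++ [y], downs)
  else
    let y := y + p.2
    (x, y, lefts, rights, ups, downs ++ [y])

-- A's index loop over range(len(dir)) equals the fold of stepA over the zipped pairs (under Pre_).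
lemma sizeGridA_eq_zip (dir : List String) (dist : List Int) (h : dir.length ≤ dist.length) :
    size_grid dir dist =
      (fun s : Int × Int × Int × Int × Int × Int => [s.1, s.2.1, s.2.2.1, s.2.2.2.1])
        ((dir.zip dist).foldl stepA (0, 0, 0, 0, 0, 0)) := by
  have hz : (dir.zip dist).length = dir.length := by
    simp [List.length_zip, Nat.min_eq_left h]
  have e1 : size_grid dir dist =
      (fun s : Int × Int × Int × Int × Int × Int => [s.1, s.2.1, s.2.2.1, s.2.2.2.1])
        ((PySem.List.pyRange 0 (dir.length : Int) 1).foldl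
          (fun st i => stepA st (PySem.List.pyGetD dir i "", PySem.List.pyGetD dist i 0))
          (0, 0, 0, 0, 0, 0)) := rfl
  rw [e1]
  have hcongr : (PySem.List.pyRange 0 (dir.length : Int) 1).foldl
      (fun st i => stepA st (PySem.List.pyGetD dir i "", PySem.List.pyGetD dist i 0))
      (0, 0, 0, 0, 0, 0)
      = (PySem.List.pyRange 0 ((dir.zip dist).length : Int) 1).foldl
      (fun st i => stepA st (PySem.List.pyGetD (dir.zip dist) i ("", 0)))
      (0, 0, 0, 0, 0, 0) := by
    rw [hz]
    apply PySem.List.foldl_congr_mem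
    intro st i hi
    have hmem := (PySem.List.mem_pyRange_one).1 hi
    have h0 : (0 : Int) ≤ i := hmem.1
    have h1 : i < (dir.length : Int) := hmem.2
    have hd' : i.toNat < dist.length := by omega
    have hzz : i.toNat < (dir.zip dist).length := by omega
    rw [PySem.List.pyGetD_eq_getElem dir "" h0 (by exact_mod_cast h1),
        PySem.List.pyGetD_eq_getElem dist 0 h0 (by omega),
        PySem.List.pyGetD_eq_getElem (dir.zip dist) ("", 0) h0 (by omega)]
    simp [List.getElem_zip]
  rw [hcongr]
  rw [PySem.List.foldl_pyRange_zero_pyGetD' (dir.zip dist) ("", 0) stepA (0, 0, 0, 0, 0, 0)]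

-- Invariant: A's four accumulators are exactly the 0-seeded fold of min/max over B's position lists.
lemma stepAB_inv : ∀ (ps : List (String × Int)) (x y : Int) (L R U D : List Int),
    ps.foldl stepA (L.foldl min 0, R.foldl max 0, U.foldl min 0, D.foldl max 0, x, y)
      = (let t := ps.foldl stepB (x, y, L, R, U, D)
         (t.2.2.1.foldl min 0, t.2.2.2.1.foldl max 0, t.2.2.2.2.1.foldl min 0,
          t.2.2.2.2.2.foldl max 0, t.1, t.2.1)) := by
  intro ps
  induction ps with
  | nil => intro x y L R U D; rfl
  | cons p rest ih =>
    intro x y L R U D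
    simp only [List.foldl_cons]
    by_cases hL : p.1 = "L"
    · have : stepA (L.foldl min 0, R.foldl max 0, U.foldl min 0, D.foldl max 0, x, y) p
          = ((L ++ [x - p.2]).foldl min 0, R.foldl max 0, U.foldl min 0, D.foldl max 0, x - p.2, y) := by
        simp [stepA, hL, List.foldl_append]
      rw [this, ih]
      simp [stepB, hL]
    · by_cases hR : p.1 = "R"
      · have : stepA (L.foldl min 0, R.foldl max 0, U.foldl min 0, D.foldl max 0, x, y) p
            = (L.foldl min 0, (R ++ [x + p.2]).foldl max 0, U.foldl min 0, D.foldl max 0, x + p.2, y) := by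
          simp [stepA, hR, List.foldl_append]
        rw [this, ih]
        simp [stepB, hR]
      · by_cases hU : p.1 = "U"
        · have : stepA (L.foldl min 0, R.foldl max 0, U.foldl min 0, D.foldl max 0, x, y) p
              = (L.foldl min 0, R.foldl max 0, (U ++ [y - p.2]).foldl min 0, D.foldl max 0, x, y - p.2) := by
            simp [stepA, hU, List.foldl_append]
          rw [this, ih]
          simp [stepB, hU]
        · have : stepA (L.foldl min 0, R.foldl max 0, U.foldl min 0, D.foldl max 0, x, y) p
              = (L.foldl min 0, R.foldl max 0, U.foldl min 0, (D ++ [y + p.2]).foldl max 0, x, y + p.2) := by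
            simp [stepA, hL, hR, hU, List.foldl_append]
          rw [this, ih]
          simp [stepB, hL, hR, hU]

-- ===== VERDICT (by name: the statement is the Claim_ definition above) =====
theorem size_grid_spec : Claim_equal_size_grid := by
  intro dir dist _ hpre
  unfold Spec_size_grid
  have e2 : size_grid_alt dir dist =
      (fun t : Int × Int × List Int × List Int × List Int × List Int =>
        [(PySem.List.min? ((0 : Int) :: t.2.2.1) (fun z => z)).getD 0,
         (PySem.List.max? ((0 : Int) :: t.2.2.2.1) (fun z => z)).getD 0,
         (PySem.List.min? ((0 : Int) :: t.2.2.2.2.1) (fun z => z)).getD 0,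
         (PySem.List.max? ((0 : Int) :: t.2.2.2.2.2) (fun z => z)).getD 0])
        ((dir.zip dist).foldl stepB (0, 0, [], [], [], [])) := rfl
  rw [sizeGridA_eq_zip dir dist hpre, e2]
  have h0 : ((0 : Int), (0 : Int), (0 : Int), (0 : Int), (0 : Int), (0 : Int))
      = (([] : List Int).foldl min 0, ([] : List Int).foldl max 0,
         ([] : List Int).foldl min 0, ([] : List Int).foldl max 0, (0 : Int), (0 : Int)) := rfl
  rw [h0, stepAB_inv (dir.zip dist) 0 0 [] [] [] []]
  simp [PySem.List.min?_id_cons, PySem.List.max?_id_cons]
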